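-- pv_equiv track=rewrite | github.com/aHappend/Crane | search/scheduler_search.py | _caps_cover_pipeline_windows
-- ===== SOURCE A (Python) =====
-- from typing import Sequence
--
-- def _caps_cover_pipeline_windows(
--     caps: Sequence[int],
--     total_sub_batches: int,
--     num_blocks: int,
--     num_states: int,
-- ) -> bool:
--     for j in range(num_blocks):
--         window_sum = 0
--         for i in range(num_states):
--             if j <= i <= num_blocks + j - 1:
--                 window_sum += int(caps[i])
--         if window_sum < total_sub_batches:
--             return False
--     return True
-- ===== SOURCE B (Python) =====
-- def _caps_cover_pipeline_windows(caps, total_sub_batches, num_blocks, num_states):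
--     window = [int(c) for c in caps[:max(num_states, 0)]]
--     prefix = [0]
--     s = 0
--     for v in window:
--         s += v
--         prefix.append(s)
--     m = len(window)
--     for j in range(num_blocks):
--         lo = min(j, m)
--         hi = min(num_blocks + j, m)
--         if prefix[hi] - prefix[lo] < total_sub_batches:
--             return False
--     return True
-- ===== Notes on version B (the rewrite author's own statement) =====
-- stated objective: alternative
-- what changed: B builds one prefix-sum array of caps[:num_states] and evaluates every window as a difference of two clamped prefix values, instead of A's rescanning all num_states indices for each of the num_blocks windows.
-- outside the precondition, e.g. on _caps_cover_pipeline_windows([0, 0], 1, 2, 3): A returns False, B returns False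
import Mathlib
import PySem

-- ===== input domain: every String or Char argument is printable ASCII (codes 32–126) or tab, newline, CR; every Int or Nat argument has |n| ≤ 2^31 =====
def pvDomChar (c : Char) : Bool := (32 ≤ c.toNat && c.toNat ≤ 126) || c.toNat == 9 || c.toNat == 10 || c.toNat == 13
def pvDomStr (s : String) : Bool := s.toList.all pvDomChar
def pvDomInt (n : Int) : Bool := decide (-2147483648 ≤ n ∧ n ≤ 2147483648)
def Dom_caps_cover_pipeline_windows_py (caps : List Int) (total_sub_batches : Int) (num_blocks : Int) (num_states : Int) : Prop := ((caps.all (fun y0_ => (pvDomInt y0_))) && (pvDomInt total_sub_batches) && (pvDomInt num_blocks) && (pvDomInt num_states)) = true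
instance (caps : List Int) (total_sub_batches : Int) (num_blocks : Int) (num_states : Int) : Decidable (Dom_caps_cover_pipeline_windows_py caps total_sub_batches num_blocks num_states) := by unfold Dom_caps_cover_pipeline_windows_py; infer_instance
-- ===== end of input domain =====

-- B replaces A's per-window rescan of all num_states indices by one prefix-sum pass and
-- a clamped prefix-difference per window (objective: alternative algorithm).

-- ===== PORT A =====
-- inner loop: for i in range(num_states): if j <= i <= num_blocks + j - 1: window_sum += caps[i]
-- caps[i] with 0 ≤ i (range indices): O(1) array access, as in Python; out of range
-- (Python's IndexError, excluded by Pre_) reads the default 0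
def pvAInner (arr : Array Int) (nb ns j : Int) : Int :=
  (PySem.List.pyRange 0 ns 1).foldl
    (fun ws i => if j ≤ i ∧ i ≤ nb + j - 1 then ws + (arr[i.toNat]?).getD 0 else ws) 0

-- outer `for j in range(num_blocks)` with early `return False`; range iterated lazily, as in Python
def pvAOuter (arr : Array Int) (tsb nb ns j : Int) : Bool :=
  if _h : j < nb then
    if pvAInner arr nb ns j < tsb then false else pvAOuter arr tsb nb ns (j + 1)
  else true
termination_by (nb - j).toNat
decreasing_by omega

def caps_cover_pipeline_windows_py (caps : List Int) (total_sub_batches : Int) (num_blocks : Int) (num_states : Int) : Bool :=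
  pvAOuter caps.toArray total_sub_batches num_blocks num_states 0

-- ===== PORT B =====
-- `for j in range(num_blocks)`, lazily, with window sums read off the prefix list
def pvBOuter (pre : List Int) (tsb nb m j : Int) : Bool :=
  if _h : j < nb then
    if PySem.List.pyGetD pre (min (nb + j) m) 0 - PySem.List.pyGetD pre (min j m) 0 < tsb then false
    else pvBOuter pre tsb nb m (j + 1)
  else true
termination_by (nb - j).toNat
decreasing_by omega

def caps_cover_pipeline_windows_py_alt (caps : List Int) (total_sub_batches : Int) (num_blocks : Int) (num_states : Int) : Bool :=
  let window := PySem.List.slice caps none (some (max num_states 0))   -- caps[:max(num_states,0)]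
  let ps := window.foldl (fun (acc : List Int × Int) v => (acc.1 ++ [acc.2 + v], acc.2 + v)) ([0], 0)
  pvBOuter ps.1 total_sub_batches num_blocks (window.length : Int) 0

-- ===== PRECONDITION & SPEC =====
-- Pre_ excludes the inputs whose scan could index caps out of range (num_blocks > 0,
-- num_states > 0 and a window reaching index ≥ len(caps)): there A either raises
-- IndexError or returns False early only because a failing window precedes the bad
-- index; B treats the missing entries as absent.  (On every excluded input on which
-- A does return, A and B in fact both return False, so Pre_ is conservative.)
def Pre_caps_cover_pipeline_windows_py (caps : List Int) (total_sub_batches : Int) (num_blocks : Int) (num_states : Int) : Prop :=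
  num_blocks ≤ 0 ∨ num_states ≤ 0 ∨ min (num_states - 1) (2 * num_blocks - 2) < (caps.length : Int)
instance (caps : List Int) (total_sub_batches : Int) (num_blocks : Int) (num_states : Int) : Decidable (Pre_caps_cover_pipeline_windows_py caps total_sub_batches num_blocks num_states) := by unfold Pre_caps_cover_pipeline_windows_py; infer_instance

def pvWitness_caps_cover_pipeline_windows_py : List Int × Int × Int × Int := ([1, 2], 1, 2, 2)

def Spec_caps_cover_pipeline_windows_py (caps : List Int) (total_sub_batches : Int) (num_blocks : Int) (num_states : Int) (out : Bool) : Prop := out = caps_cover_pipeline_windows_py_alt caps total_sub_batches num_blocks num_states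
instance (caps : List Int) (total_sub_batches : Int) (num_blocks : Int) (num_states : Int) (out : Bool) : Decidable (Spec_caps_cover_pipeline_windows_py caps total_sub_batches num_blocks num_states out) := by unfold Spec_caps_cover_pipeline_windows_py; infer_instance

-- ===== CLAIM (what is proved, stated in full; the proofs are below) =====
def Claim_equal_caps_cover_pipeline_windows_py : Prop := ∀ (caps : List Int) (total_sub_batches : Int) (num_blocks : Int) (num_states : Int), Dom_caps_cover_pipeline_windows_py caps total_sub_batches num_blocks num_states → Pre_caps_cover_pipeline_windows_py caps total_sub_batches num_blocks num_states → Spec_caps_cover_pipeline_windows_py caps total_sub_batches num_blocks num_states (caps_cover_pipeline_windows_py caps total_sub_batches num_blocks num_states)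

-- ===== LEMMAS AND PROOFS =====

-- a conditional-accumulation foldl is an (ite _ _ 0) sum
lemma pv_foldl_if_sum (l : List Int) (c : Int → Prop) [DecidablePred c] (g : Int → Int) (a : Int) :
    l.foldl (fun ws i => if c i then ws + g i else ws) a
      = a + (l.map (fun i => if c i then g i else 0)).sum := by
  induction l generalizing a with
  | nil => simp
  | cons x xs ih => simp [List.foldl_cons, ih]; split_ifs <;> ring

-- the prefix-building foldl of port B, characterized
lemma pv_foldPrefix (w : List Int) (p : List Int) (s : Int) :
    (w.foldl (fun (acc : List Int × Int) v => (acc.1 ++ [acc.2 + v], acc.2 + v)) (p, s)).1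
      = p ++ (List.range w.length).map (fun k => s + (w.take (k + 1)).sum) := by
  induction w generalizing p s with
  | nil => simp
  | cons v vs ih =>
      simp only [List.foldl_cons, ih, List.length_cons, List.range_succ_eq_map]
      simp [List.map_map, Function.comp, List.append_assoc, add_assoc]

-- reading the prefix list at an in-range index
lemma pv_getPrefix (w : List Int) (i : Int) (h0 : 0 ≤ i) (h1 : i ≤ (w.length : Int)) :
    PySem.List.pyGetD ((0 : Int) :: (List.range w.length).map (fun k => (w.take (k + 1)).sum)) i 0
      = (w.take i.toNat).sum := by
  obtain ⟨n, rfl⟩ : ∃ n : Nat, i = (n : Int) := ⟨i.toNat, by omega⟩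
  rw [PySem.List.pyGetD_natCast]
  cases n with
  | zero => simp
  | succ k =>
      have hk : k < w.length := by exact_mod_cast (by omega : (k : Int) < (w.length : Int))
      simp [List.getD, hk]

-- list sum over (range n).map f is the Finset sum
lemma pv_sum_map_range (n : Nat) (f : Nat → Int) :
    ((List.range n).map f).sum = ∑ k ∈ Finset.range n, f k := by
  induction n with
  | zero => simp
  | succ m ih => rw [List.range_succ, List.map_append, List.sum_append, Finset.sum_range_succ, ih]; simp

-- sum of a take, as a Finset sum of getD
lemma pv_sum_take (w : List Int) (b : Nat) (hb : b ≤ w.length) :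
    (w.take b).sum = ∑ k ∈ Finset.range b, w.getD k 0 := by
  induction b with
  | zero => simp
  | succ m ih =>
      have hm : m < w.length := by omega
      rw [List.take_add_one, List.sum_append, Finset.sum_range_succ, ih (by omega)]
      simp [List.getD, hm]

-- the heart: A's inner window sum equals B's prefix difference
lemma pv_pointwise (caps : List Int) (nb ns j : Int)
    (hPre : nb ≤ 0 ∨ ns ≤ 0 ∨ min (ns - 1) (2 * nb - 2) < (caps.length : Int))
    (h0 : 0 ≤ j) (h1 : j < nb) :
    pvAInner caps.toArray nb ns j
      = ((caps.take ns.toNat).take (min (nb + j) ((caps.take ns.toNat).length : Int)).toNat).sum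
        - ((caps.take ns.toNat).take (min j ((caps.take ns.toNat).length : Int)).toNat).sum := by
  set w := caps.take ns.toNat with hw
  have hm : w.length = min ns.toNat caps.length := by simp [hw]
  set m : Int := (w.length : Int) with hmdef
  have hlo_le_hi : (min j m).toNat ≤ (min (nb + j) m).toNat := by omega
  have hhi_le : (min (nb + j) m).toNat ≤ w.length := by omega
  -- A side to a filtered Finset sum
  rw [pvAInner, pv_foldl_if_sum, PySem.List.pyRange_one, List.map_map]
  have hA : ((List.range (ns - 0).toNat).map
        ((fun i => if j ≤ i ∧ i ≤ nb + j - 1 then (caps.toArray[i.toNat]?).getD 0 else 0) ∘ fun k : Nat => (0 : Int) + k)).sum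
      = ∑ k ∈ Finset.range ns.toNat, (if j ≤ (k : Int) ∧ (k : Int) ≤ nb + j - 1 then caps.getD k 0 else 0) := by
    rw [pv_sum_map_range]
    refine Finset.sum_congr (by norm_num) (fun k _ => ?_)
    simp [List.getD]
  rw [hA, zero_add, ← Finset.sum_filter (fun k : Nat => j ≤ (k : Int) ∧ (k : Int) ≤ nb + j - 1) (fun k : Nat => caps.getD k 0)]
  -- B side as a Finset.Ico sum
  rw [pv_sum_take w _ hhi_le, pv_sum_take w _ (le_trans hlo_le_hi hhi_le),
      ← Finset.sum_Ico_eq_sub _ hlo_le_hi]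
  -- same index set, same terms
  have hset : (Finset.range ns.toNat).filter (fun k : Nat => j ≤ (k : Int) ∧ (k : Int) ≤ nb + j - 1)
      = Finset.Ico (min j m).toNat (min (nb + j) m).toNat := by
    ext k
    simp only [Finset.mem_filter, Finset.mem_range, Finset.mem_Ico]
    have hcast : ((min j m).toNat : Int) = min j m := by omega
    have hcast2 : ((min (nb + j) m).toNat : Int) = min (nb + j) m := by omega
    constructor
    · rintro ⟨hk, hj1, hj2⟩
      have hki : (k : Int) < ns := by omega
      have hklen : (k : Int) < (caps.length : Int) := by
        rcases hPre with h | h | h <;> omega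
      omega
    · rintro ⟨ha, hb⟩
      have : (k : Int) < min (nb + j) m := by omega
      have hjk : j ≤ (k : Int) := by
        by_contra hlt
        rw [not_le] at hlt
        have hmk : m ≤ (k : Int) := by omega
        rcases hPre with h | h | h
        · omega
        · omega
        · omega
      constructor
      · have : (k : Int) < m := by omega
        omega
      · exact ⟨hjk, by omega⟩
  rw [hset]
  refine Finset.sum_congr rfl (fun k hk => ?_)
  simp only [Finset.mem_Ico] at hk
  have hkw : k < w.length := by omega
  have hkc : k < caps.length := by omega
  have hkn : (k : Int) < ns := by omega
  simp [hw, List.getD, List.getElem?_eq_getElem hkc, hkn]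

-- the two outer loops agree once every visited window sum agrees
lemma pv_outer_congr (arr : Array Int) (pre : List Int) (tsb nb ns m j : Int)
    (h : ∀ x, j ≤ x → x < nb → pvAInner arr nb ns x
        = PySem.List.pyGetD pre (min (nb + x) m) 0 - PySem.List.pyGetD pre (min x m) 0) :
    pvAOuter arr tsb nb ns j = pvBOuter pre tsb nb m j := by
  rw [pvAOuter, pvBOuter]
  by_cases hj : j < nb
  · simp only [hj, dif_pos, h j le_rfl hj]
    split_ifs with hc
    · rfl
    · exact pv_outer_congr arr pre tsb nb ns m (j + 1) (fun x hx1 hx2 => h x (by omega) hx2)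
  · simp [hj]
termination_by (nb - j).toNat
decreasing_by omega

-- ===== VERDICT (by name: the statement is the Claim_ definition above) =====
theorem caps_cover_pipeline_windows_py_spec : Claim_equal_caps_cover_pipeline_windows_py := by
  intro caps tsb nb ns _hDom hPre
  unfold Spec_caps_cover_pipeline_windows_py
  unfold caps_cover_pipeline_windows_py caps_cover_pipeline_windows_py_alt
  have hsl : PySem.List.slice caps none (some (max ns 0)) = caps.take ns.toNat := by
    rw [PySem.List.slice_to caps (le_max_right ns 0)]
    congr 1
    omega
  set w := caps.take ns.toNat with hw
  have hpre1 : (w.foldl (fun (acc : List Int × Int) v => (acc.1 ++ [acc.2 + v], acc.2 + v)) ([0], 0)).1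
      = (0 : Int) :: (List.range w.length).map (fun k => (w.take (k + 1)).sum) := by
    rw [pv_foldPrefix]
    simp
  rw [hsl]
  show pvAOuter caps.toArray tsb nb ns 0
      = pvBOuter ((w.foldl (fun (acc : List Int × Int) v => (acc.1 ++ [acc.2 + v], acc.2 + v)) ([0], 0)).1)
          tsb nb ((w.length : Int)) 0
  rw [hpre1]
  apply pv_outer_congr
  intro j hj0 hj1
  have hm0 : (0 : Int) ≤ (w.length : Int) := by positivity
  rw [pv_getPrefix w _ (by omega) (by omega), pv_getPrefix w _ (by omega) (by omega)]
  exact pv_pointwise caps nb ns j hPre hj0 hj1
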